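-- pv_equiv track=rewrite | github.com/mangalagb/Leetcode | Medium/LongestSubstringWithAtLeastKRepeatingCharacters.py | verify_all_characters
-- ===== SOURCE A (Python) =====
-- def verify_all_characters(str, k):
--     local_map = {}
--     for character in str:
--         if character in local_map:
--             local_map[character] += 1
--         else:
--             local_map[character] = 1
--
--     values = local_map.values()
--     for value in values:
--         if value < k:
--             return False
--     return True
-- ===== SOURCE B (Python) =====
-- def verify_all_characters(str, k):
--     s = sorted(str)
--     n = len(s)
--     i = 0
--     while i < n:
--         j = i + 1
--         while j < n and s[j] == s[i]:
--             j += 1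
--         if j - i < k:
--             return False
--         i = j
--     return True
-- ===== Notes on version B (the rewrite author's own statement) =====
-- stated objective: alternative
-- what changed: Replaces the frequency-dictionary pass plus value scan with sort-then-scan: sort the string so equal characters become contiguous runs, then walk the sorted list once and fail as soon as a run is shorter than k.
import Mathlib
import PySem

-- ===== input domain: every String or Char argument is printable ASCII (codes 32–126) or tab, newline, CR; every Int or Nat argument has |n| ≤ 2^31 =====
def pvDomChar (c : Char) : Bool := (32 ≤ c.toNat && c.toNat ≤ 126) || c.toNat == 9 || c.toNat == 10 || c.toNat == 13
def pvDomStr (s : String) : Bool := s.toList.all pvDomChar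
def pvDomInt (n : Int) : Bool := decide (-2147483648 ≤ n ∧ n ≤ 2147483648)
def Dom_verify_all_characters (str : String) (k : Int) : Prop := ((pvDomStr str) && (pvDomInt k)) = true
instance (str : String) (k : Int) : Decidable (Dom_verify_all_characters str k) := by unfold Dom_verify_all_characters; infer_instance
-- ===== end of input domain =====

-- B replaces A's counting dictionary + value scan by sort-then-scan over runs of equal characters; an alternative algorithm, not claimed faster.

-- ===== PORT A =====
-- the counting loop: if character in local_map: local_map[character] += 1 else: local_map[character] = 1
def pvCountMap (cs : List Char) : PySem.Dict Char Int :=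
  cs.foldl (fun m c => if (m.get? c).isSome then m.insert c (m.getD c 0 + 1) else m.insert c 1)
    PySem.Dict.empty

-- the value loop with early return: for value in values: if value < k: return False; return True
def pvCheckValues (k : Int) : List Int → Bool
  | [] => true
  | v :: rest => if v < k then false else pvCheckValues k rest

def verify_all_characters (str : String) (k : Int) : Bool :=
  pvCheckValues k (pvCountMap str.toList).values

-- ===== PORT B =====
-- the outer while walks the sorted list run by run; the inner while (j advancing past equal chars)
-- is the takeWhile/dropWhile split of the current suffix; 'if j - i < k: return False' is the run-length test
def pvRunScan (k : Int) : List Char → Bool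
  | [] => true
  | c :: rest =>
    if ((rest.takeWhile (fun x => x == c)).length + 1 : Int) < k then false
    else pvRunScan k (rest.dropWhile (fun x => x == c))
termination_by l => l.length
decreasing_by
  simpa using Nat.lt_succ_of_le (List.length_dropWhile_le _ _)

def verify_all_characters_alt (str : String) (k : Int) : Bool :=
  pvRunScan k (PySem.List.sorted str.toList (fun x => x) false)

-- ===== PRECONDITION & SPEC =====
def Spec_verify_all_characters (str : String) (k : Int) (out : Bool) : Prop := out = verify_all_characters_alt str k
instance (str : String) (k : Int) (out : Bool) : Decidable (Spec_verify_all_characters str k out) := by unfold Spec_verify_all_characters; infer_instance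

-- ===== CLAIM =====
def Claim_equal_verify_all_characters : Prop := ∀ (str : String) (k : Int), Dom_verify_all_characters str k → Spec_verify_all_characters str k (verify_all_characters str k)

-- ===== LEMMAS AND PROOFS =====

-- A's branch on membership is the unconditional getD-increment insert
theorem pvCountMap_eq_counter (cs : List Char) : pvCountMap cs = PySem.Dict.counter cs := by
  rw [← PySem.Dict.foldl_insert_getD_add_one_eq_counter]
  unfold pvCountMap
  congr 1
  funext m c
  by_cases h : (m.get? c).isSome
  · simp [h]
  · rw [if_neg h, PySem.Dict.getD_of_get?_eq_none m 0 (Option.not_isSome_iff_eq_none.mp h)]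
    norm_num

theorem pvCheckValues_iff (k : Int) (vs : List Int) :
    pvCheckValues k vs = true ↔ ∀ v ∈ vs, ¬ v < k := by
  induction vs with
  | nil => simp [pvCheckValues]
  | cons v rest ih =>
    by_cases h : v < k
    · simp [pvCheckValues, h]
    · simp [pvCheckValues, h, ih]
      intro _
      exact not_lt.mp h

-- A returns true iff every character's count is at least k
theorem portA_iff (str : String) (k : Int) :
    verify_all_characters str k = true ↔
      ∀ c ∈ str.toList, ¬ ((str.toList.count c : Int) < k) := by
  unfold verify_all_characters
  rw [pvCountMap_eq_counter, pvCheckValues_iff]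
  have hv : (PySem.Dict.counter str.toList).values
      = (PySem.Set.ofList str.toList).map (fun c => (str.toList.count c : Int)) := by
    simp [PySem.Dict.values, PySem.Dict.items_counter, List.map_map, Function.comp]
  rw [hv]
  constructor
  · intro h c hc
    exact h _ (List.mem_map_of_mem ((PySem.Set.mem_ofList _ _).mpr hc))
  · intro h v hv
    obtain ⟨c, hc, rfl⟩ := List.mem_map.mp hv
    exact h c ((PySem.Set.mem_ofList _ _).mp hc)

-- on a suffix of a sorted list whose head test fails, every element exceeds c
theorem drop_gt (c : Char) (rest : List Char) (h : (c :: rest).Pairwise (· ≤ ·)) :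
    ∀ x ∈ rest.dropWhile (fun x => x == c), c < x := by
  intro x hx
  have hsub : (rest.dropWhile (fun x => x == c)).Sublist rest := List.dropWhile_sublist _
  have hle : c ≤ x := (List.pairwise_cons.mp h).1 x (hsub.mem hx)
  have hpd : (rest.dropWhile (fun x => x == c)).Pairwise (· ≤ ·) :=
    ((List.pairwise_cons.mp h).2).sublist hsub
  cases hd : rest.dropWhile (fun x => x == c) with
  | nil => simp [hd] at hx
  | cons e es =>
    have he : ¬ (e == c) = true := by
      have := List.head?_dropWhile_not (fun x => x == c) rest
      simp [hd] at this; simpa using this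
    have hec : c < e := lt_of_le_of_ne
      (by
        have : e ∈ rest.dropWhile (fun x => x == c) := by simp [hd]
        exact (List.pairwise_cons.mp h).1 e (hsub.mem this))
      (fun hce => he (by simp [hce.symm]))
    rw [hd] at hx
    rcases List.mem_cons.mp hx with rfl | hx'
    · exact hec
    · have := (List.pairwise_cons.mp (hd ▸ hpd)).1 x hx'
      exact lt_of_lt_of_le hec this

-- the run-scan on a sorted list checks exactly "every character's count is ≥ k"
theorem runScan_iff (k : Int) : ∀ (n : Nat) (l : List Char), l.length ≤ n →
    l.Pairwise (· ≤ ·) →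
    (pvRunScan k l = true ↔ ∀ c ∈ l, ¬ ((l.count c : Int) < k)) := by
  intro n
  induction n with
  | zero =>
    intro l hl _
    have : l = [] := List.eq_nil_of_length_eq_zero (Nat.le_zero.mp hl)
    subst this; simp [pvRunScan]
  | succ n ih =>
    intro l hl hp
    cases l with
    | nil => simp [pvRunScan]
    | cons c rest =>
      set t := rest.takeWhile (fun x => x == c) with ht
      set d := rest.dropWhile (fun x => x == c) with hdd
      have hsplit : rest = t ++ d := (List.takeWhile_append_dropWhile).symm
      have htc : ∀ x ∈ t, x = c := by
        intro x hx
        have := List.mem_takeWhile_imp hx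
        simpa using this
      have hdgt : ∀ x ∈ d, c < x := drop_gt c rest hp
      have hcnotd : c ∉ d := fun hcd => lt_irrefl c (hdgt c hcd)
      have hcount_c : ((c :: rest).count c : Int) = t.length + 1 := by
        have h1 : rest.count c = t.length := by
          rw [hsplit, List.count_append]
          have : t.count c = t.length := by
            rw [List.count_eq_length]; intro x hx; simp [htc x hx]
          rw [this, List.count_eq_zero.mpr hcnotd]
          omega
        simp only [List.count_cons, h1, beq_self_eq_true, if_pos]
        push_cast
        omega
      have hcount_d : ∀ x ∈ d, (c :: rest).count x = d.count x := by
        intro x hx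
        have hxc : x ≠ c := fun h => lt_irrefl c (h ▸ hdgt x hx)
        have hxt : x ∉ t := fun h => hxc (htc x h)
        rw [hsplit, List.count_cons, List.count_append,
          List.count_eq_zero.mpr hxt]
        simp [Ne.symm hxc]
      have hdp : d.Pairwise (· ≤ ·) :=
        ((List.pairwise_cons.mp hp).2).sublist (List.dropWhile_sublist _)
      have hdl : d.length ≤ n := by
        have h1 : d.length ≤ rest.length := List.length_dropWhile_le _ _
        have h2 : rest.length ≤ n := by simpa using Nat.le_of_succ_le_succ hl
        exact le_trans h1 h2
      have ihd := ih d hdl hdp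
      rw [pvRunScan, ← ht, ← hdd]
      by_cases hk : ((t.length : Int) + 1) < k
      · simp only [if_pos hk]
        constructor
        · intro h; exact absurd h (by simp)
        · intro h
          exact absurd (hcount_c ▸ h c (List.mem_cons_self)) (by simpa using hk)
      · simp only [if_neg hk]
        rw [ihd]
        constructor
        · intro h x hx
          rcases List.mem_cons.mp hx with rfl | hx'
          · rw [hcount_c]; exact hk
          · rcases (List.mem_append.mp (hsplit ▸ hx')) with hxt | hxd
            · rw [htc x hxt, hcount_c]; exact hk
            · rw [hcount_d x hxd]; exact h x hxd
        · intro h x hx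
          have hxl : x ∈ c :: rest := by
            exact List.mem_cons_of_mem c (hsplit ▸ List.mem_append_right t hx)
          rw [← hcount_d x hx]; exact h x hxl

-- ===== VERDICT =====
theorem verify_all_characters_spec : Claim_equal_verify_all_characters := by
  intro str k _
  unfold Spec_verify_all_characters verify_all_characters_alt
  set s := PySem.List.sorted str.toList (fun x => x) false with hs
  have hperm : s.Perm str.toList := PySem.List.sorted_perm _ _ _
  have hpw : s.Pairwise (· ≤ ·) := by
    simpa using PySem.List.sorted_pairwise str.toList (fun x => x)
  have hb := runScan_iff k s.length s le_rfl hpw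
  have ha := portA_iff str k
  have hmem : ∀ c, c ∈ s ↔ c ∈ str.toList := fun c => hperm.mem_iff
  have hcnt : ∀ c, s.count c = str.toList.count c := fun c => hperm.count_eq c
  rw [Bool.eq_iff_iff, ha, hb]
  constructor
  · intro h c hc
    rw [hcnt c]
    exact h c ((hmem c).mp hc)
  · intro h c hc
    have := h c ((hmem c).mpr hc)
    rwa [hcnt c] at this
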